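-- pv_equiv track=rewrite | github.com/blackdoor/Data-Mining | hw2/hw2.py | frequencies_for_cutoffs
-- ===== SOURCE A (Python) =====
-- def frequencies_for_cutoffs(values, cutoff_points):
-- 	""" Finds the count of values that fall in the cutoffs and returns a list"""
-- 	new_values = []
-- 	for v in values:
-- 		found = False
-- 		for i in range(len(cutoff_points)):
-- 			if not found and v <= cutoff_points[i]:
-- 				new_values.append(i + 1)
-- 				found = True
-- 		if not found:
-- 			new_values.append(len(cutoff_points) + 1)
-- 	return new_values
-- ===== SOURCE B (Python) =====
-- def frequencies_for_cutoffs(values, cutoff_points):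
--     """ Finds the count of values that fall in the cutoffs and returns a list"""
--     # First matching cutoff index for v is the first i with v <= max(cutoff_points[:i+1]),
--     # and the running-maximum array is nondecreasing, so binary-search it.
--     prefix_max = []
--     m = None
--     for c in cutoff_points:
--         if m is None or c > m:
--             m = c
--         prefix_max.append(m)
--     n = len(prefix_max)
--     out = []
--     for v in values:
--         lo, hi = 0, n
--         while lo < hi:
--             mid = (lo + hi) // 2
--             if prefix_max[mid] < v:
--                 lo = mid + 1
--             else:
--                 hi = mid
--         out.append(lo + 1)
--     return out
-- ===== Notes on version B (the rewrite author's own statement) =====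
-- stated objective: faster
-- what changed: Replaces the per-value linear scan of all cutoffs with a binary search over the (nondecreasing) running-maximum array of the cutoffs, which has the same first-match bin for every value.
import Mathlib
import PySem

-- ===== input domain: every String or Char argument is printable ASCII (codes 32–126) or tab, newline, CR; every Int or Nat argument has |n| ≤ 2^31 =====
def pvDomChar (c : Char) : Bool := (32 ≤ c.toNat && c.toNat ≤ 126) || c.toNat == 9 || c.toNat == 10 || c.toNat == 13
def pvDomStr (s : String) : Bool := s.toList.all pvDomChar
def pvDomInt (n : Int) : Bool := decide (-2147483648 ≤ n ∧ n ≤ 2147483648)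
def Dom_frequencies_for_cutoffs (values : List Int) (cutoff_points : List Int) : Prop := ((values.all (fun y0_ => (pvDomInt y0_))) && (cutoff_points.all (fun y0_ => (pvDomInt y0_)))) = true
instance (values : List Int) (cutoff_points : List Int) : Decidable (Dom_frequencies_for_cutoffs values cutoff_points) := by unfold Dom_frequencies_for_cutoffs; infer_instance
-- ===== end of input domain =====

-- B replaces A's per-value linear scan of the cutoffs by a binary search over the
-- running-maximum array of the cutoffs (faster per the asymptotics; timing-checked).

-- ===== PORT A =====
def frequencies_for_cutoffs (values : List Int) (cutoff_points : List Int) : List Int :=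
  values.foldl (fun new_values v =>
    let r := (PySem.List.pyRange 0 (cutoff_points.length : Int) 1).foldl
      (fun (s : List Int × Bool) i =>
        if !s.2 && decide (v ≤ PySem.List.pyGetD cutoff_points i 0) then
          (s.1 ++ [i + 1], true)
        else s)
      (new_values, false)
    if !r.2 then r.1 ++ [(cutoff_points.length : Int) + 1] else r.1) []

-- ===== PORT B =====
-- running maximum of the cutoffs (B's first loop; `m = None` start)
def pvPrefixMax : List Int → Option Int → List Int
  | [], _ => []
  | c :: rest, m =>
    let m' := match m with
      | none => c
      | some mv => if c > mv then c else mv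
    m' :: pvPrefixMax rest (some m')

-- B's hand-written bisect_left while-loop
def pvBisect (pm : List Int) (v : Int) (lo hi : Nat) : Nat :=
  if h : lo < hi then
    let mid := (lo + hi) / 2
    if pm.getD mid 0 < v then pvBisect pm v (mid + 1) hi
    else pvBisect pm v lo mid
  else lo
termination_by hi - lo
decreasing_by all_goals omega

def frequencies_for_cutoffs_alt (values : List Int) (cutoff_points : List Int) : List Int :=
  let pm := pvPrefixMax cutoff_points none
  values.map (fun v => ((pvBisect pm v 0 pm.length : Int) + 1))

-- ===== PRECONDITION & SPEC =====
def Spec_frequencies_for_cutoffs (values : List Int) (cutoff_points : List Int) (out : List Int) : Prop := out = frequencies_for_cutoffs_alt values cutoff_points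
instance (values : List Int) (cutoff_points : List Int) (out : List Int) : Decidable (Spec_frequencies_for_cutoffs values cutoff_points out) := by unfold Spec_frequencies_for_cutoffs; infer_instance

-- ===== CLAIM (what is proved, stated in full; the proofs are below) =====
def Claim_equal_frequencies_for_cutoffs : Prop := ∀ (values : List Int) (cutoff_points : List Int), Dom_frequencies_for_cutoffs values cutoff_points → Spec_frequencies_for_cutoffs values cutoff_points (frequencies_for_cutoffs values cutoff_points)

-- ===== LEMMAS AND PROOFS =====

-- characterisation of List.findIdx
lemma pvFindIdx_char (p : Int → Bool) : ∀ (l : List Int) (k : Nat), k ≤ l.length →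
    (∀ j < k, p (l.getD j 0) = false) → (k < l.length → p (l.getD k 0) = true) →
    l.findIdx p = k := by
  intro l
  induction l with
  | nil => intro k hk _ _; simpa using (Nat.le_zero.mp hk).symm
  | cons x xs ih =>
    intro k hk h1 h2
    cases k with
    | zero =>
      have hx : p x = true := by simpa using h2 (by simp)
      simp [List.findIdx_cons, hx]
    | succ k' =>
      have hx : p x = false := h1 0 (Nat.succ_pos _)
      have := ih k' (by simpa using hk)
        (fun j hj => by simpa using h1 (j + 1) (by omega))
        (fun h => by simpa using h2 (by simpa using h))
      simp [List.findIdx_cons, hx, this]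

-- once found, the inner loop is the identity
lemma pvInnerFound (v : Int) : ∀ (l : List (Int × Int)) (nv : List Int),
    l.foldl (fun (s : List Int × Bool) p =>
      if !s.2 && decide (v ≤ p.2) then (s.1 ++ [p.1 + 1], true) else s) (nv, true) = (nv, true) := by
  intro l
  induction l with
  | nil => intro nv; rfl
  | cons p rest ih => intro nv; simpa using ih nv

-- the inner loop (over the enumerated cutoffs) appends the first-match index
lemma pvInnerMain (v : Int) : ∀ (cps : List Int) (s : Int) (nv : List Int),
    (PySem.List.enumerate cps s).foldl (fun (st : List Int × Bool) p =>
      if !st.2 && decide (v ≤ p.2) then (st.1 ++ [p.1 + 1], true) else st) (nv, false) =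
    if cps.findIdx (fun c => decide (v ≤ c)) < cps.length
    then (nv ++ [s + (cps.findIdx (fun c => decide (v ≤ c)) : Int) + 1], true)
    else (nv, false) := by
  intro cps
  induction cps with
  | nil => intro s nv; simp [PySem.List.enumerate_nil]
  | cons c rest ih =>
    intro s nv
    rw [PySem.List.enumerate_cons]
    by_cases h : v ≤ c
    · simp only [List.foldl_cons, Bool.not_false, decide_eq_true h, Bool.true_and]
      rw [if_pos trivial, pvInnerFound]
      simp [List.findIdx_cons, h]
    · simp only [List.foldl_cons, Bool.not_false, decide_eq_false h,
        Bool.and_false, Bool.false_eq_true, if_false]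
      rw [ih (s + 1) nv]
      simp only [List.findIdx_cons, decide_eq_false h, cond_false, List.length_cons]
      by_cases hlt : rest.findIdx (fun c => decide (v ≤ c)) < rest.length
      · have hcast : s + 1 + (rest.findIdx (fun c => decide (v ≤ c)) : Int) + 1 =
            s + ((rest.findIdx (fun c => decide (v ≤ c)) + 1 : Nat) : Int) + 1 := by
          push_cast; ring
        rw [if_pos hlt, if_pos (by omega), hcast]
      · rw [if_neg hlt, if_neg (by omega)]

-- A maps each value to (first cutoff index with v ≤ cutoff, else len) + 1
lemma pvA_eq_map (values cps : List Int) :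
    frequencies_for_cutoffs values cps =
      values.map (fun v => ((cps.findIdx (fun c => decide (v ≤ c)) : Int) + 1)) := by
  unfold frequencies_for_cutoffs
  conv_rhs => rw [← List.nil_append (values.map fun v =>
    ((cps.findIdx (fun c => decide (v ≤ c)) : Int) + 1))]
  rw [← PySem.List.foldl_append_singleton_eq_map]
  apply PySem.List.foldl_congr_mem
  intro nv v _
  have hen := PySem.List.enumerate_eq_map_pyRange (xs := cps) (d := 0)
  rw [PySem.List.len_eq] at hen
  have hfold : (PySem.List.pyRange 0 (cps.length : Int) 1).foldl
      (fun (s : List Int × Bool) i =>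
        if !s.2 && decide (v ≤ PySem.List.pyGetD cps i 0) then (s.1 ++ [i + 1], true) else s)
      (nv, false) =
      (PySem.List.enumerate cps 0).foldl (fun (st : List Int × Bool) p =>
        if !st.2 && decide (v ≤ p.2) then (st.1 ++ [p.1 + 1], true) else st) (nv, false) := by
    rw [hen, List.foldl_map]
  rw [hfold, pvInnerMain]
  by_cases hlt : cps.findIdx (fun c => decide (v ≤ c)) < cps.length
  · simp [hlt]
  · have : cps.findIdx (fun c => decide (v ≤ c)) = cps.length :=
      Nat.le_antisymm (List.findIdx_le_length) (by omega)
    simp [this]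

lemma pvPrefixMax_lb : ∀ (cps : List Int) (mv x : Int),
    x ∈ pvPrefixMax cps (some mv) → mv ≤ x := by
  intro cps
  induction cps with
  | nil => intro mv x hx; simp [pvPrefixMax] at hx
  | cons c rest ih =>
    intro mv x hx
    simp only [pvPrefixMax, List.mem_cons] at hx
    have hm : mv ≤ (if c > mv then c else mv) := by split <;> omega
    rcases hx with h | h
    · omega
    · exact le_trans hm (ih _ _ h)

lemma pvPrefixMax_sorted : ∀ (cps : List Int) (m : Option Int),
    (pvPrefixMax cps m).Pairwise (· ≤ ·) := by
  intro cps
  induction cps with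
  | nil => intro m; simp [pvPrefixMax]
  | cons c rest ih =>
    intro m
    simp only [pvPrefixMax, List.pairwise_cons]
    exact ⟨fun x hx => pvPrefixMax_lb rest _ x hx, ih _⟩

lemma pvMonoGetD (pm : List Int) (h : pm.Pairwise (· ≤ ·)) (i j : Nat)
    (hij : i ≤ j) (hj : j < pm.length) : pm.getD i 0 ≤ pm.getD j 0 := by
  rcases Nat.lt_or_ge i j with hlt | hge
  · rw [List.getD_eq_getElem pm 0 (by omega), List.getD_eq_getElem pm 0 hj]
    exact List.pairwise_iff_getElem.mp h i j (by omega) hj hlt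
  · have : i = j := by omega
    subst this; rfl

lemma pvPM_findIdx_some (v : Int) : ∀ (cps : List Int) (mv : Int), mv < v →
    (pvPrefixMax cps (some mv)).findIdx (fun c => decide (v ≤ c)) =
      cps.findIdx (fun c => decide (v ≤ c)) := by
  intro cps
  induction cps with
  | nil => intro mv _; rfl
  | cons c rest ih =>
    intro mv hmv
    simp only [pvPrefixMax]
    by_cases h : v ≤ c
    · have h' : v ≤ (if c > mv then c else mv) := by split <;> omega
      simp [List.findIdx_cons, h, h']
    · have h' : ¬ v ≤ (if c > mv then c else mv) := by split <;> omega
      have h'' : (if c > mv then c else mv) < v := by omega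
      simp only [List.findIdx_cons, decide_eq_false h, decide_eq_false h', cond_false]
      rw [ih _ h'']

lemma pvPM_findIdx (v : Int) (cps : List Int) :
    (pvPrefixMax cps none).findIdx (fun c => decide (v ≤ c)) =
      cps.findIdx (fun c => decide (v ≤ c)) := by
  cases cps with
  | nil => rfl
  | cons c rest =>
    simp only [pvPrefixMax]
    by_cases h : v ≤ c
    · simp [List.findIdx_cons, h]
    · simp only [List.findIdx_cons, decide_eq_false h, cond_false]
      rw [pvPM_findIdx_some v rest c (by omega)]

-- binary search over a nondecreasing array computes findIdx
lemma pvBisect_eq (pm : List Int) (v : Int)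
    (hmono : ∀ i j : Nat, i ≤ j → j < pm.length → pm.getD i 0 ≤ pm.getD j 0) :
    ∀ (n lo hi : Nat), hi - lo ≤ n → lo ≤ hi → hi ≤ pm.length →
    (∀ j < lo, pm.getD j 0 < v) → (∀ j, hi ≤ j → j < pm.length → v ≤ pm.getD j 0) →
    pvBisect pm v lo hi = pm.findIdx (fun c => decide (v ≤ c)) := by
  intro n
  induction n with
  | zero =>
    intro lo hi hn hle hhi hlo hhiP
    have heq : lo = hi := by omega
    subst heq
    rw [pvBisect, dif_neg (by omega)]
    refine (pvFindIdx_char _ pm lo (by omega) ?_ ?_).symm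
    · intro j hj
      exact decide_eq_false (by have := hlo j hj; omega)
    · intro h
      exact decide_eq_true (hhiP lo (le_refl _) h)
  | succ n ih =>
    intro lo hi hn hle hhi hlo hhiP
    by_cases hlt : lo < hi
    · rw [pvBisect, dif_pos hlt]
      by_cases hc : pm.getD ((lo + hi) / 2) 0 < v
      · simp only [if_pos hc]
        apply ih ((lo + hi) / 2 + 1) hi (by omega) (by omega) hhi
        · intro j hj
          calc pm.getD j 0 ≤ pm.getD ((lo + hi) / 2) 0 :=
                hmono j _ (by omega) (by omega)
            _ < v := hc
        · exact hhiP
      · simp only [if_neg hc]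
        apply ih lo ((lo + hi) / 2) (by omega) (by omega) (by omega) hlo
        intro j hj hjlen
        calc v ≤ pm.getD ((lo + hi) / 2) 0 := by omega
          _ ≤ pm.getD j 0 := hmono _ j hj hjlen
    · rw [pvBisect, dif_neg hlt]
      have heq : lo = hi := by omega
      subst heq
      refine (pvFindIdx_char _ pm lo (by omega) ?_ ?_).symm
      · intro j hj
        exact decide_eq_false (by have := hlo j hj; omega)
      · intro h
        exact decide_eq_true (hhiP lo (le_refl _) h)

-- B computes the same map
lemma pvB_eq_map (values cps : List Int) :
    frequencies_for_cutoffs_alt values cps =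
      values.map (fun v => ((cps.findIdx (fun c => decide (v ≤ c)) : Int) + 1)) := by
  unfold frequencies_for_cutoffs_alt
  apply List.map_congr_left
  intro v _
  have hmono := fun i j hij hj =>
    pvMonoGetD (pvPrefixMax cps none) (pvPrefixMax_sorted cps none) i j hij hj
  have := pvBisect_eq (pvPrefixMax cps none) v hmono (pvPrefixMax cps none).length 0
    (pvPrefixMax cps none).length (by omega) (by omega) (le_refl _)
    (by intro j hj; omega) (by intro j hj hjlen; omega)
  rw [this, pvPM_findIdx]

-- ===== VERDICT (by name: the statement is the Claim_ definition above) =====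
theorem frequencies_for_cutoffs_spec : Claim_equal_frequencies_for_cutoffs := by
  intro values cps _
  unfold Spec_frequencies_for_cutoffs
  rw [pvA_eq_map, pvB_eq_map]
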